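-- pv_equiv track=rewrite | github.com/hap318/code-edabit | longest_cont_array_ending.py | lengthsOflongestContiguousElems
-- ===== SOURCE A (Python) =====
-- def lengthsOflongestContiguousElems(input):
--     #assuming input has at least one element else return None
--     output = []
--     for i in range(len(input)):
--         tmp = 1
--         j = i-1
--         while j >= 0 and input[i] > input[j]:
--             tmp += output[j]
--             j -= output[j]
--         output.append(tmp)
--     return output
-- ===== SOURCE B (Python) =====
-- def lengthsOflongestContiguousElems(input):
--     output = []
--     stack = []  # indices with strictly non-ascending values, top = last
--     for i in range(len(input)):
--         while stack and input[stack[-1]] < input[i]: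
--             stack.pop()
--         output.append(i + 1 if not stack else i - stack[-1])
--         stack.append(i)
--     return output
-- ===== Notes on version B (the rewrite author's own statement) =====
-- stated objective: idiomatic
-- what changed: Replaces A's backward jumps through the output array (j -= output[j]) with the canonical stock-span monotonic stack of indices maintained across iterations.
import Mathlib
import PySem

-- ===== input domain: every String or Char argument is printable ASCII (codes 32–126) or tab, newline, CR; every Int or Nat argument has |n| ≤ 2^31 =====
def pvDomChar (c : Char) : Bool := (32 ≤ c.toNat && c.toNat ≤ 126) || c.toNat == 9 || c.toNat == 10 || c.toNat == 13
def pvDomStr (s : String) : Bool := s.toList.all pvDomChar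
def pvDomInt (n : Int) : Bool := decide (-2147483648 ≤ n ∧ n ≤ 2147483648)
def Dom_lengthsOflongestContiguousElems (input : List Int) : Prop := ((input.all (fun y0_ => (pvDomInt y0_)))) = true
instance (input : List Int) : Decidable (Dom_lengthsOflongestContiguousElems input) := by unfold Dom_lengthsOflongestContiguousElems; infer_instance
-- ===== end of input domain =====

-- B replaces A's backward jumps through the output array with the canonical stock-span monotonic index stack (idiomatic; same amortized cost).


-- ===== PORT A =====
-- the inner 'while j >= 0 and input[i] > input[j]' loop; fuel i+1 bounds its ≤ i iterations
-- (pyGetD's default is never read on reachable states: j is always a valid index of both lists there)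
def pvAWhile (input output : List Int) (x : Int) : Nat → Int → Int → Int
  | 0, _, tmp => tmp
  | fuel + 1, j, tmp =>
    if 0 ≤ j ∧ PySem.List.pyGetD input j 0 < x then
      pvAWhile input output x fuel (j - PySem.List.pyGetD output j 0)
        (tmp + PySem.List.pyGetD output j 0)
    else tmp

def lengthsOflongestContiguousElems (input : List Int) : List Int :=
  (List.range input.length).foldl (fun (output : List Int) (i : Nat) =>
    let x := PySem.List.pyGetD input (i : Int) 0
    output ++ [pvAWhile input output x (i + 1) ((i : Int) - 1) 1]) []

-- ===== PORT B =====
-- pop while stack nonempty and input[stack[-1]] < input[i]; stack held top-first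
def pvBPop (input : List Int) (x : Int) : List Int → List Int
  | [] => []
  | t :: rest => if PySem.List.pyGetD input t 0 < x then pvBPop input x rest else t :: rest

def lengthsOflongestContiguousElems_alt (input : List Int) : List Int :=
  ((List.range input.length).foldl (fun (st : List Int × List Int) (i : Nat) =>
    let x := PySem.List.pyGetD input (i : Int) 0
    let stack := pvBPop input x st.1
    let span : Int := match stack with
      | [] => (i : Int) + 1
      | t :: _ => (i : Int) - t
    ((i : Int) :: stack, st.2 ++ [span])) ([], [])).2

-- ===== PRECONDITION & SPEC =====
def Spec_lengthsOflongestContiguousElems (input : List Int) (out : List Int) : Prop := out = lengthsOflongestContiguousElems_alt input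
instance (input : List Int) (out : List Int) : Decidable (Spec_lengthsOflongestContiguousElems input out) := by unfold Spec_lengthsOflongestContiguousElems; infer_instance

-- ===== CLAIM (what is proved, stated in full; the proofs are below) =====
def Claim_equal_lengthsOflongestContiguousElems : Prop := ∀ (input : List Int), Dom_lengthsOflongestContiguousElems input → Spec_lengthsOflongestContiguousElems input (lengthsOflongestContiguousElems input)

-- ===== LEMMAS AND PROOFS =====

-- the index where A's inner loop stops (-1 if it walks off the left end)
def pvStop (input output : List Int) (x : Int) : Nat → Int → Int
  | 0, j => j
  | fuel + 1, j =>
    if 0 ≤ j ∧ PySem.List.pyGetD input j 0 < x then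
      pvStop input output x fuel (j - PySem.List.pyGetD output j 0)
    else j

-- the chain of indices reached from j by repeatedly jumping j ↦ j - output[j]
def pvChain (output : List Int) : Nat → Int → List Int
  | 0, _ => []
  | fuel + 1, j =>
    if j < 0 then [] else j :: pvChain output fuel (j - PySem.List.pyGetD output j 0)

-- every already-computed span m satisfies 1 ≤ output[m] ≤ m+1
def pvBounds (output : List Int) : Prop :=
  ∀ j : Int, 0 ≤ j → j < output.length →
    1 ≤ PySem.List.pyGetD output j 0 ∧ PySem.List.pyGetD output j 0 ≤ j + 1

theorem pvStop_succ (input output : List Int) (x : Int) (fuel : Nat) (j : Int) :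
    pvStop input output x (fuel + 1) j =
      if 0 ≤ j ∧ PySem.List.pyGetD input j 0 < x then
        pvStop input output x fuel (j - PySem.List.pyGetD output j 0)
      else j := rfl

theorem pvChain_succ (output : List Int) (fuel : Nat) (j : Int) :
    pvChain output (fuel + 1) j =
      if j < 0 then [] else j :: pvChain output fuel (j - PySem.List.pyGetD output j 0) := rfl

theorem pvGetD_append (xs : List Int) (v d : Int) (j : Int) (h0 : 0 ≤ j)
    (h : j < (xs.length : Int)) :
    PySem.List.pyGetD (xs ++ [v]) j d = PySem.List.pyGetD xs j d := by
  rw [PySem.List.pyGetD_eq_getElem _ _ h0 (by simp; omega),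
      PySem.List.pyGetD_eq_getElem _ _ h0 h,
      List.getElem_append_left (by omega)]

theorem pvGetD_append_last (xs : List Int) (v d : Int) :
    PySem.List.pyGetD (xs ++ [v]) ((xs.length : Int)) d = v := by
  rw [PySem.List.pyGetD_eq_getElem _ _ (by positivity) (by simp)]
  simp

theorem pvStop_of_neg (input output : List Int) (x : Int) (fuel : Nat) (j : Int)
    (h : j < 0) : pvStop input output x fuel j = j := by
  cases fuel with
  | zero => rfl
  | succ f => rw [pvStop_succ, if_neg (by omega)]

theorem pvChain_of_neg (output : List Int) (fuel : Nat) (j : Int)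
    (h : j < 0) : pvChain output fuel j = [] := by
  cases fuel with
  | zero => rfl
  | succ f => rw [pvChain_succ, if_pos h]

theorem pvAWhile_eq_stop (input output : List Int) (x : Int) :
    ∀ (fuel : Nat) (j tmp : Int),
      pvAWhile input output x fuel j tmp = tmp + j - pvStop input output x fuel j := by
  intro fuel
  induction fuel with
  | zero => intro j tmp; simp [pvAWhile, pvStop]
  | succ f ih =>
    intro j tmp
    simp only [pvAWhile, pvStop_succ]
    split_ifs with h
    · rw [ih]; ring
    · ring

theorem pvStop_bounds (input output : List Int) (x : Int) (hb : pvBounds output) :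
    ∀ (fuel : Nat) (j : Int), -1 ≤ j → j < (output.length : Int) →
      -1 ≤ pvStop input output x fuel j ∧ pvStop input output x fuel j ≤ j := by
  intro fuel
  induction fuel with
  | zero => intro j hj _; simp only [pvStop]; omega
  | succ f ih =>
    intro j hj hlen
    rw [pvStop_succ]
    split_ifs with h
    · obtain ⟨h1, h2⟩ := hb j h.1 hlen
      have := ih (j - PySem.List.pyGetD output j 0) (by omega) (by omega)
      omega
    · omega

theorem pvChain_fuel (output : List Int) (hb : pvBounds output) :
    ∀ (fuel fuel' : Nat) (j : Int), -1 ≤ j → j < (output.length : Int) →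
      j < (fuel : Int) → j < (fuel' : Int) →
      pvChain output fuel j = pvChain output fuel' j := by
  intro fuel
  induction fuel with
  | zero =>
    intro fuel' j hj _ hf _
    rw [pvChain_of_neg _ _ _ (by exact_mod_cast hf), pvChain_of_neg _ _ _ (by exact_mod_cast hf)]
  | succ f ih =>
    intro fuel' j hj hlen hf hf'
    by_cases hneg : j < 0
    · rw [pvChain_of_neg _ _ _ hneg, pvChain_of_neg _ _ _ hneg]
    · obtain ⟨f', rfl⟩ : ∃ f', fuel' = f' + 1 := ⟨fuel' - 1, by omega⟩
      rw [pvChain_succ, pvChain_succ, if_neg hneg, if_neg hneg]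
      obtain ⟨h1, h2⟩ := hb j (by omega) hlen
      rw [ih f' _ (by omega) (by omega) (by push_cast at hf ⊢; omega)
          (by push_cast at hf' ⊢; omega)]

theorem pvChain_append (output : List Int) (v : Int) (hb : pvBounds output) :
    ∀ (fuel : Nat) (j : Int), -1 ≤ j → j < (output.length : Int) →
      pvChain (output ++ [v]) fuel j = pvChain output fuel j := by
  intro fuel
  induction fuel with
  | zero => intro j _ _; rfl
  | succ f ih =>
    intro j hj hlen
    by_cases hneg : j < 0
    · rw [pvChain_of_neg _ _ _ hneg, pvChain_of_neg _ _ _ hneg]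
    · rw [pvChain_succ, pvChain_succ, if_neg hneg, if_neg hneg,
          pvGetD_append _ _ _ _ (by omega) hlen]
      obtain ⟨h1, h2⟩ := hb j (by omega) hlen
      rw [ih _ (by omega) (by omega)]

theorem pvBPop_cons (input : List Int) (x t : Int) (rest : List Int) :
    pvBPop input x (t :: rest)
      = if PySem.List.pyGetD input t 0 < x then pvBPop input x rest else t :: rest := rfl

theorem pvBPop_chain (input output : List Int) (x : Int) (hb : pvBounds output) :
    ∀ (fuel : Nat) (j : Int), -1 ≤ j → j < (output.length : Int) → j < (fuel : Int) →
      pvBPop input x (pvChain output fuel j)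
        = pvChain output fuel (pvStop input output x fuel j) := by
  intro fuel
  induction fuel with
  | zero => intro j hj _ hf; simp [pvChain, pvBPop]
  | succ f ih =>
    intro j hj hlen hf
    have hfi : j < ((f : Nat) : Int) + 1 := by push_cast at hf; omega
    by_cases hneg : j < 0
    · rw [pvChain_of_neg _ _ _ hneg, pvStop_of_neg _ _ _ _ _ hneg,
          pvChain_of_neg _ _ _ hneg]
      rfl
    · obtain ⟨h1, h2⟩ := hb j (by omega) hlen
      have hchain : pvChain output (f + 1) j
          = j :: pvChain output f (j - PySem.List.pyGetD output j 0) := by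
        rw [pvChain_succ, if_neg hneg]
      by_cases hc : PySem.List.pyGetD input j 0 < x
      · have hstop : pvStop input output x (f + 1) j
            = pvStop input output x f (j - PySem.List.pyGetD output j 0) := by
          rw [pvStop_succ, if_pos ⟨by omega, hc⟩]
        rw [hstop, hchain, pvBPop_cons, if_pos hc,
            ih _ (by omega) (by omega) (by omega)]
        have hs := pvStop_bounds input output x hb f
          (j - PySem.List.pyGetD output j 0) (by omega) (by omega)
        exact pvChain_fuel output hb f (f + 1) _ (by omega) (by omega)
          (by omega) (by omega)
      · have hstop : pvStop input output x (f + 1) j = j := by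
          rw [pvStop_succ, if_neg (by intro hh; exact hc hh.2)]
        rw [hstop, hchain, pvBPop_cons, if_neg hc]

-- the two folds, named so the invariant can speak about them (definitionally the ports' step lambdas)
def pvFA (input : List Int) (output : List Int) (i : Nat) : List Int :=
  output ++ [pvAWhile input output (PySem.List.pyGetD input (i : Int) 0) (i + 1) ((i : Int) - 1) 1]

def pvFB (input : List Int) (st : List Int × List Int) (i : Nat) : List Int × List Int :=
  ((i : Int) :: pvBPop input (PySem.List.pyGetD input (i : Int) 0) st.1,
   st.2 ++ [match pvBPop input (PySem.List.pyGetD input (i : Int) 0) st.1 with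
     | [] => (i : Int) + 1
     | t :: _ => (i : Int) - t])

theorem pvA_eq_foldFA (input : List Int) :
    lengthsOflongestContiguousElems input = (List.range input.length).foldl (pvFA input) [] := rfl

theorem pvB_eq_foldFB (input : List Int) :
    lengthsOflongestContiguousElems_alt input
      = ((List.range input.length).foldl (pvFB input) ([], [])).2 := rfl

theorem pvInvariant (input : List Int) :
    ∀ k : Nat,
      ((List.range k).foldl (pvFB input) ([], [])).2
          = (List.range k).foldl (pvFA input) []
      ∧ ((List.range k).foldl (pvFA input) []).length = k
      ∧ pvBounds ((List.range k).foldl (pvFA input) [])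
      ∧ ((List.range k).foldl (pvFB input) ([], [])).1
          = pvChain ((List.range k).foldl (pvFA input) []) (k + 1) ((k : Int) - 1) := by
  intro k
  induction k with
  | zero =>
    refine ⟨rfl, rfl, ?_, ?_⟩
    · intro j h0 hl; simp at hl; omega
    · simp [pvChain]
  | succ k ih =>
    obtain ⟨ihB, ihLen, ihBd, ihSt⟩ := ih
    set stA := (List.range k).foldl (pvFA input) [] with hstA
    set x := PySem.List.pyGetD input (k : Int) 0 with hx
    set s := pvStop input stA x (k + 1) ((k : Int) - 1) with hs
    have hlenc : (stA.length : Int) = (k : Int) := by rw [ihLen]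
    have hsb : -1 ≤ s ∧ s ≤ (k : Int) - 1 := by
      rw [hs]
      exact pvStop_bounds input stA x ihBd (k + 1) ((k : Int) - 1) (by omega) (by omega)
    have htmp : pvAWhile input stA x (k + 1) ((k : Int) - 1) 1 = (k : Int) - s := by
      rw [pvAWhile_eq_stop, ← hs]; omega
    have hpop : pvBPop input x (pvChain stA (k + 1) ((k : Int) - 1)) = pvChain stA (k + 1) s := by
      rw [hs]
      exact pvBPop_chain input stA x ihBd (k + 1) ((k : Int) - 1) (by omega) (by omega)
        (by push_cast; omega)
    have hspan :
        (match pvChain stA (k + 1) s with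
          | [] => (k : Int) + 1
          | t :: _ => (k : Int) - t) = (k : Int) - s := by
      by_cases hneg : s < 0
      · rw [pvChain_of_neg _ _ _ hneg]
        show (k : Int) + 1 = (k : Int) - s
        omega
      · rw [pvChain_succ, if_neg hneg]
    have hA : (List.range (k + 1)).foldl (pvFA input) [] = stA ++ [(k : Int) - s] := by
      rw [List.range_succ, List.foldl_append, List.foldl_cons, List.foldl_nil, ← hstA]
      show stA ++ [pvAWhile input stA x (k + 1) ((k : Int) - 1) 1] = _
      rw [htmp]
    have hB : (List.range (k + 1)).foldl (pvFB input) ([], [])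
        = ((k : Int) :: pvChain stA (k + 1) s, stA ++ [(k : Int) - s]) := by
      rw [List.range_succ, List.foldl_append, List.foldl_cons, List.foldl_nil]
      show ((k : Int) :: pvBPop input x ((List.range k).foldl (pvFB input) ([], [])).1,
        ((List.range k).foldl (pvFB input) ([], [])).2
          ++ [match pvBPop input x ((List.range k).foldl (pvFB input) ([], [])).1 with
              | [] => (k : Int) + 1
              | t :: _ => (k : Int) - t]) = _
      rw [ihSt, ihB, hpop, hspan]
    have hBd' : pvBounds (stA ++ [(k : Int) - s]) := by
      intro j h0 hl
      simp only [List.length_append, List.length_cons, List.length_nil] at hl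
      by_cases hj : j < (stA.length : Int)
      · rw [pvGetD_append _ _ _ _ h0 hj]; exact ihBd j h0 hj
      · have hjl : j = (stA.length : Int) := by push_cast at hl; omega
        rw [hjl, pvGetD_append_last, hlenc]
        omega
    refine ⟨?_, ?_, ?_, ?_⟩
    · rw [hA, hB]
    · rw [hA]; simp [ihLen]
    · rw [hA]; exact hBd'
    · rw [hA, hB]
      show (k : Int) :: pvChain stA (k + 1) s
          = pvChain (stA ++ [(k : Int) - s]) (k + 1 + 1) (((k : Nat) + 1 : Int) - 1)
      have harg : ((k : Nat) + 1 : Int) - 1 = ((k : Nat) : Int) := by omega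
      have hlast : PySem.List.pyGetD (stA ++ [(k : Int) - s]) ((k : Int)) 0 = (k : Int) - s := by
        have h := pvGetD_append_last stA ((k : Int) - s) 0
        rwa [hlenc] at h
      have harg2 : (k : Int) - ((k : Int) - s) = s := by omega
      have hrhs : pvChain (stA ++ [(k : Int) - s]) (k + 1 + 1) ((k : Nat) : Int)
          = (k : Int) :: pvChain (stA ++ [(k : Int) - s]) (k + 1) s := by
        rw [pvChain_succ, if_neg (by omega), hlast, harg2]
      rw [harg, hrhs, pvChain_append _ _ ihBd (k + 1) s (by omega) (by omega)]

-- ===== VERDICT (by name: the statement is the Claim_ definition above) =====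
theorem lengthsOflongestContiguousElems_spec : Claim_equal_lengthsOflongestContiguousElems := by
  intro input _
  show lengthsOflongestContiguousElems input = lengthsOflongestContiguousElems_alt input
  rw [pvA_eq_foldFA, pvB_eq_foldFB, (pvInvariant input input.length).1]
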